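-- pv_equiv track=rewrite | github.com/soyukke/lean-unsolved | scripts/collatz_cf_correlation.py | collatz_orbit_ud
-- ===== SOURCE A (Python) =====
-- def collatz_orbit_ud(n):
--     """軌道のU/Dパターンを返す。U=奇数(上昇), D=偶数(下降)"""
--     pattern = []
--     while n != 1:
--         if n % 2 == 0:
--             n //= 2
--             pattern.append('D')
--         else:
--             n = 3 * n + 1
--             pattern.append('U')
--     return pattern
-- ===== SOURCE B (Python) =====
-- def collatz_orbit_ud(n):
--     """U/D pattern via the accelerated Collatz map: strip each maximal run of
--     factors 2 at once (a block of 'D's), then take one compressed odd step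
--     n -> (3*n + 1) // 2, which always contributes 'U' followed by 'D'."""
--     pattern = []
--     while n != 1:
--         if n % 2 == 0:
--             t = 0
--             while n % 2 == 0:
--                 n //= 2
--                 t += 1
--             pattern += ['D'] * t
--         else:
--             pattern += ['U', 'D']
--             n = (3 * n + 1) // 2
--     return pattern
-- ===== Notes on version B (the rewrite author's own statement) =====
-- stated objective: alternative
-- what changed: B replaces A's one-label-per-step loop by the accelerated Collatz map: each iteration strips a maximal run of factors 2 at once (emitting a whole block of 'D's) and takes the compressed odd step n -> (3n+1)//2 (emitting 'U','D'), so the outer loop runs once per parity segment instead of once per step.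
import Mathlib
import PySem

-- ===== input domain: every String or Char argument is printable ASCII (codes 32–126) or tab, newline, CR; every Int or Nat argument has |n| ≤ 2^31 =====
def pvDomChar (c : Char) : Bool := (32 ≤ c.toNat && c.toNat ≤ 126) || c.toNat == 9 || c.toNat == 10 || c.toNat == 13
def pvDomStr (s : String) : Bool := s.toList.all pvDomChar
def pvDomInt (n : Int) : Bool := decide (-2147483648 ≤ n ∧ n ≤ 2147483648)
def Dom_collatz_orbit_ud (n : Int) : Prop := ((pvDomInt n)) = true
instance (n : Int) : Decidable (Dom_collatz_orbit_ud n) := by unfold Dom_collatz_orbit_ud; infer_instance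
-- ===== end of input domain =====

-- B replaces the one-label-per-step loop by the accelerated Collatz map: it strips each
-- maximal run of factors 2 at once (a block of 'D's) and takes the compressed odd step
-- n -> (3n+1)//2 emitting 'U','D'; same output, different iteration structure (alternative).
-- Both while-loops are ported with fuel; Pre_ excludes n ≤ 0, where Python A never returns.

def pvFuel : Nat := 1000000

-- ===== PORT A =====
-- fused loop: while n != 1, append 'D' or 'U' and update n (one fuel per iteration)
def collatzLoopA : Nat → Int → List String
  | 0, _ => []
  | fuel + 1, n =>
    if n = 1 then []
    else if PySem.Int.mod n 2 = 0 then
      "D" :: collatzLoopA fuel (PySem.Int.floordiv n 2)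
    else
      "U" :: collatzLoopA fuel (3 * n + 1)

def collatz_orbit_ud (n : Int) : List String := collatzLoopA pvFuel n

-- ===== PORT B =====
-- inner while of B: repeatedly n //= 2 while n is even, counting the divisions;
-- returns the stripped value together with the count (own fuel, as any while port)
def stripTwos : Nat → Int → Int × Nat
  | 0, n => (n, 0)
  | f + 1, n =>
    if PySem.Int.mod n 2 = 0 then
      ((stripTwos f (PySem.Int.floordiv n 2)).1, (stripTwos f (PySem.Int.floordiv n 2)).2 + 1)
    else (n, 0)

-- needed by collatzLoopB's termination argument (cited in decreasing_by)
lemma stripTwos_snd_pos (g : Nat) (n : Int) (hg : 0 < g) (h : PySem.Int.mod n 2 = 0) :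
    1 ≤ (stripTwos g n).2 := by
  cases g with
  | zero => omega
  | succ f =>
    simp only [stripTwos]
    rw [if_pos h]
    simp

-- outer while of B: one iteration per segment; fuel is spent per emitted label so the
-- port truncates exactly like A's at fuel exhaustion (never reached on terminating runs);
-- 'min' only realises that truncation and is the identity whenever fuel remains
def collatzLoopB : Nat → Int → List String
  | 0, _ => []
  | f + 1, n =>
    if n = 1 then []
    else if h : PySem.Int.mod n 2 = 0 then
      List.replicate (min (stripTwos pvFuel n).2 (f + 1)) "D" ++
        collatzLoopB ((f + 1) - (stripTwos pvFuel n).2) (stripTwos pvFuel n).1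
    else
      "U" :: (match f with
        | 0 => []
        | f' + 1 => "D" :: collatzLoopB f' (PySem.Int.floordiv (3 * n + 1) 2))
  termination_by f _ => f
  decreasing_by
  · have := stripTwos_snd_pos pvFuel n (by norm_num [pvFuel]) h
    omega
  · omega

def collatz_orbit_ud_alt (n : Int) : List String := collatzLoopB pvFuel n

-- ===== PRECONDITION & SPEC =====
-- Pre_ excludes n ≤ 0: there Python A's loop cycles without ever reaching 1 (no return).
def Pre_collatz_orbit_ud (n : Int) : Prop := 1 ≤ n
instance (n : Int) : Decidable (Pre_collatz_orbit_ud n) := by unfold Pre_collatz_orbit_ud; infer_instance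
def pvWitness_collatz_orbit_ud : Int := (7)

def Spec_collatz_orbit_ud (n : Int) (out : List String) : Prop := out = collatz_orbit_ud_alt n
instance (n : Int) (out : List String) : Decidable (Spec_collatz_orbit_ud n out) := by unfold Spec_collatz_orbit_ud; infer_instance

-- ===== CLAIM (what is proved, stated in full; the proofs are below) =====
def Claim_equal_collatz_orbit_ud : Prop := ∀ (n : Int), Dom_collatz_orbit_ud n → Pre_collatz_orbit_ud n → Spec_collatz_orbit_ud n (collatz_orbit_ud n)

-- ===== LEMMAS AND PROOFS =====

lemma even_pos_facts (n : Int) (hn : 0 < n) (h : PySem.Int.mod n 2 = 0) :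
    n ≠ 1 ∧ 0 < PySem.Int.floordiv n 2 := by
  rw [PySem.Int.mod_eq_emod_of_pos (by norm_num)] at h
  rw [PySem.Int.floordiv_eq_ediv_of_pos (by norm_num)]
  omega

lemma odd_pos_facts (n : Int) (hn : 0 < n) (h : ¬ PySem.Int.mod n 2 = 0) :
    PySem.Int.mod (3 * n + 1) 2 = 0 ∧ (3 * n + 1) ≠ 1 ∧ 0 < PySem.Int.floordiv (3 * n + 1) 2 := by
  rw [PySem.Int.mod_eq_emod_of_pos (by norm_num)] at h
  rw [PySem.Int.mod_eq_emod_of_pos (by norm_num),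
      PySem.Int.floordiv_eq_ediv_of_pos (by norm_num)]
  omega

lemma stripTwos_fst_pos (g : Nat) : ∀ n : Int, 0 < n → 0 < (stripTwos g n).1 := by
  induction g with
  | zero => intro n hn; simpa [stripTwos] using hn
  | succ f ih =>
    intro n hn
    simp only [stripTwos]
    by_cases h : PySem.Int.mod n 2 = 0
    · rw [if_pos h]; exact ih _ (even_pos_facts n hn h).2
    · rw [if_neg h]; exact hn

-- A's loop, run over one maximal even run: it emits one 'D' per stripped factor 2
-- (truncated by the fuel) and continues from the stripped value
lemma loopA_strip (g : Nat) : ∀ (n m : Int) (t : Nat), 0 < n → stripTwos g n = (m, t) →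
    ∀ f : Nat, f ≤ g →
      collatzLoopA f n = List.replicate (min t f) "D" ++ collatzLoopA (f - t) m := by
  induction g with
  | zero =>
    intro n m t _ hs f hf
    simp only [stripTwos] at hs
    obtain ⟨rfl, rfl⟩ : n = m ∧ 0 = t := ⟨congrArg Prod.fst hs, congrArg Prod.snd hs⟩
    simp
  | succ g ih =>
    intro n m t hn hs f hf
    by_cases h : PySem.Int.mod n 2 = 0
    · simp only [stripTwos, h, if_pos] at hs
      obtain ⟨hm, ht⟩ : (stripTwos g (PySem.Int.floordiv n 2)).1 = m ∧
          (stripTwos g (PySem.Int.floordiv n 2)).2 + 1 = t :=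
        ⟨congrArg Prod.fst hs, congrArg Prod.snd hs⟩
      cases f with
      | zero => simp [collatzLoopA]
      | succ f' =>
        have hne := (even_pos_facts n hn h).1
        have hpos := (even_pos_facts n hn h).2
        have := ih (PySem.Int.floordiv n 2) m (stripTwos g (PySem.Int.floordiv n 2)).2
          hpos (by rw [← hm]) f' (by omega)
        simp only [collatzLoopA, hne, if_pos, h, ite_false]
        rw [this, ← ht]
        simp [Nat.succ_min_succ, List.replicate_succ]
    · simp only [stripTwos, h, ite_false] at hs
      obtain ⟨rfl, rfl⟩ : n = m ∧ 0 = t := ⟨congrArg Prod.fst hs, congrArg Prod.snd hs⟩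
      simp

lemma loopB_zero (n : Int) : collatzLoopB 0 n = [] := by
  rw [collatzLoopB.eq_def]

lemma loopB_succ (f : Nat) (n : Int) :
    collatzLoopB (f + 1) n =
      (if n = 1 then []
       else if PySem.Int.mod n 2 = 0 then
         List.replicate (min (stripTwos pvFuel n).2 (f + 1)) "D" ++
           collatzLoopB ((f + 1) - (stripTwos pvFuel n).2) (stripTwos pvFuel n).1
       else
         "U" :: (match f with
           | 0 => []
           | f' + 1 => "D" :: collatzLoopB f' (PySem.Int.floordiv (3 * n + 1) 2))) := by
  rw [collatzLoopB.eq_def]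
  rfl

lemma loopAB (f : Nat) : f ≤ pvFuel → ∀ n : Int, 0 < n → collatzLoopA f n = collatzLoopB f n := by
  induction f using Nat.strong_induction_on with
  | _ f ih =>
    intro hf n hn
    match f with
    | 0 => rw [loopB_zero]; rfl
    | f' + 1 =>
      rw [loopB_succ]
      by_cases h1 : n = 1
      · rw [if_pos h1]
        simp [collatzLoopA, h1]
      · rw [if_neg h1]
        by_cases h : PySem.Int.mod n 2 = 0
        · rw [if_pos h]
          have ht1 : 1 ≤ (stripTwos pvFuel n).2 :=
            stripTwos_snd_pos pvFuel n (by norm_num [pvFuel]) h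
          have hA := loopA_strip pvFuel n (stripTwos pvFuel n).1 (stripTwos pvFuel n).2 hn
            rfl (f' + 1) hf
          have hrec := ih ((f' + 1) - (stripTwos pvFuel n).2) (by omega) (by omega)
            (stripTwos pvFuel n).1 (stripTwos_fst_pos pvFuel n hn)
          rw [hA, hrec]
        · rw [if_neg h]
          have hfacts := odd_pos_facts n hn h
          match f' with
          | 0 =>
            simp only [collatzLoopA]
            rw [if_neg h1, if_neg h]
          | f'' + 1 =>
            have hrec := ih f'' (by omega) (by omega)
              (PySem.Int.floordiv (3 * n + 1) 2) hfacts.2.2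
            simp only [collatzLoopA]
            rw [if_neg h1, if_neg h, if_neg hfacts.2.1, if_pos hfacts.1, hrec]

-- ===== VERDICT (by name: the statement is the Claim_ definition above) =====
theorem collatz_orbit_ud_spec : Claim_equal_collatz_orbit_ud := by
  intro n _ hpre
  unfold Spec_collatz_orbit_ud collatz_orbit_ud collatz_orbit_ud_alt
  exact loopAB pvFuel le_rfl n hpre
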